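-- pv_equiv track=rewrite | github.com/AvajiOT/forgottenserver-cpplinter-updater | update_cpplinter.py | verify_and_update_table
-- ===== SOURCE A (Python) =====
-- def verify_and_update_table(table, luascript_lines):
--     """Verifies and updates the table with the correct line numbers."""
--     updated_table = {}
--     for key, (file_path, line_number) in table.items():
--         if line_number <= len(luascript_lines):
--             # Verify the line content matches the key
--             if key in luascript_lines[line_number - 1]:
--                 updated_table[key] = (file_path, line_number)
--             else:
--                 # Search for the correct line number
--                 for i, line in enumerate(luascript_lines):
--                     if key in line:
--                         updated_table[key] = (file_path, i + 1)
--                         break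
--         else:
--             # Search for the correct line number
--             for i, line in enumerate(luascript_lines):
--                 if key in line:
--                     updated_table[key] = (file_path, i + 1)
--                     break
--
--     return updated_table
-- ===== SOURCE B (Python) =====
-- def verify_and_update_table(table, luascript_lines):
--     total = len(luascript_lines)
--     # table pass: keep keys whose cached line number still points at a matching line
--     verified = {}
--     pending = []
--     for k, (path, num) in table.items():
--         if 1 <= num <= total and k in luascript_lines[num - 1]:
--             verified[k] = num
--         else:
--             pending.append(k)
--     # one pass over the lines: each pending key is resolved at its first matching line
--     first_hit = {}
--     for idx, text in enumerate(luascript_lines):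
--         if not pending:
--             break
--         misses = []
--         for k in pending:
--             if k in text:
--                 first_hit[k] = idx + 1
--             else:
--                 misses.append(k)
--         pending = misses
--     # assemble in table order; keys that matched nowhere are dropped
--     result = {}
--     for k, (path, num) in table.items():
--         if k in verified:
--             result[k] = (path, num)
--         elif k in first_hit:
--             result[k] = (path, first_hit[k])
--     return result
-- ===== Notes on version B (the rewrite author's own statement) =====
-- stated objective: alternative
-- what changed: Replaces A's per-key inner scans over the lines with a three-stage pipeline: one table pass keeping in-range cached entries whose line still matches, ONE enumerate pass over the lines that resolves every still-pending key at its first matching line while shrinking the pending list, and an assembly pass in table order; Pre_ additionally requires distinct keys (the Python parameter is a dict, so every real input has them) and excludes the line numbers on which A raises IndexError.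
-- intended difference: On tables with an entry whose cached line number ln satisfies -len(lines) < ln <= 0 and whose key occurs in the wrapped-around line lines[ln-1], A keeps the nonpositive ln (Python negative-index wraparound), while B searches and returns the 1-based line of the first real match, which is the intended verified line number. — e.g. on verify_and_update_table([("a", "f.lua", 0)], ["a = 1"]): A returns [("a", "f.lua", 0)], B returns [("a", "f.lua", 1)]
import Mathlib
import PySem

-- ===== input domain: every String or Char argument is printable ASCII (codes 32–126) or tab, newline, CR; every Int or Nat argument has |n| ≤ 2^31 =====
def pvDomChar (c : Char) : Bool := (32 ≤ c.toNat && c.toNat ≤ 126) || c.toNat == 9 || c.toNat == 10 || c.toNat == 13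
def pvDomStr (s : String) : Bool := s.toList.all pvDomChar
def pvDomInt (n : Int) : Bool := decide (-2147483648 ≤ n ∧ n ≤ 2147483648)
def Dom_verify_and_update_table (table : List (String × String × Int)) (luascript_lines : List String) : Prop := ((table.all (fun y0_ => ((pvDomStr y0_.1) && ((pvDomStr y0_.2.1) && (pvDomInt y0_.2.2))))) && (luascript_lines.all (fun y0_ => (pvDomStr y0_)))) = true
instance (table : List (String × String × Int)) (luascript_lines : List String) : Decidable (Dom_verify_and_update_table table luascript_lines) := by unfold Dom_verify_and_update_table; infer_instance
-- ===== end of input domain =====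

-- B replaces A's per-key inner scans with one table pass (fast path), ONE enumerate pass over the
-- lines resolving all still-pending keys, and an assembly pass in table order ('alternative').

-- ===== PORT A =====
-- A's inner 'for i, line in enumerate(...): if key in line: ...; break' search loop
def pvSearchA (key : String) (lines : List String) (i : Nat) : Option Int :=
  match lines with
  | [] => none
  | l :: ls => if PySem.Str.isIn key l then some ((i : Int) + 1) else pvSearchA key ls (i + 1)

def verify_and_update_table (table : List (String × String × Int)) (luascript_lines : List String) : List (String × String × Int) :=
  (table.foldl (fun (acc : PySem.Dict String (String × Int)) e =>
    if e.2.2 ≤ PySem.List.len luascript_lines then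
      match PySem.List.pyGet? luascript_lines (e.2.2 - 1) with
      | none => acc   -- Python raises IndexError here; excluded by Pre_
      | some l =>
        if PySem.Str.isIn e.1 l then acc.insert e.1 (e.2.1, e.2.2)
        else
          match pvSearchA e.1 luascript_lines 0 with
          | some j => acc.insert e.1 (e.2.1, j)
          | none => acc
    else
      match pvSearchA e.1 luascript_lines 0 with
      | some j => acc.insert e.1 (e.2.1, j)
      | none => acc) PySem.Dict.empty).items

-- ===== PORT B =====
-- B's fast-path test: cached line number in range (1-based) and the key a substring of that line
def pvFastHit (lines : List String) (n : Int) (e : String × String × Int) : Bool :=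
  decide (1 ≤ e.2.2) && decide (e.2.2 ≤ n) && PySem.Str.isIn e.1 (PySem.List.pyGetD lines (e.2.2 - 1) "")

-- B's first table pass: dict of fast-verified keys, plus the pending key list
def pvFastPass (lines : List String) (n : Int) (table : List (String × String × Int)) :
    PySem.Dict String Int × List String :=
  table.foldl (fun st e =>
    if pvFastHit lines n e then (st.1.insert e.1 e.2.2, st.2) else (st.1, st.2 ++ [e.1])) (PySem.Dict.empty, [])

-- B's single pass over the lines: each pending key is recorded at its first matching line
def pvLinePass (lines : List String) (i : Nat) (pending : List String) (found : PySem.Dict String Int) :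
    PySem.Dict String Int :=
  match lines with
  | [] => found
  | l :: ls =>
    if pending.isEmpty then found
    else
      let st := pending.foldl (fun (p : List String × PySem.Dict String Int) k =>
        if PySem.Str.isIn k l then (p.1, p.2.insert k ((i : Int) + 1)) else (p.1 ++ [k], p.2)) ([], found)
      pvLinePass ls (i + 1) st.1 st.2

def verify_and_update_table_alt (table : List (String × String × Int)) (luascript_lines : List String) : List (String × String × Int) :=
  let n := PySem.List.len luascript_lines
  let fp := pvFastPass luascript_lines n table
  let found := pvLinePass luascript_lines 0 fp.2 PySem.Dict.empty
  (table.foldl (fun (acc : PySem.Dict String (String × Int)) e =>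
    if fp.1.contains e.1 then acc.insert e.1 (e.2.1, e.2.2)
    else
      match found.get? e.1 with
      | some j => acc.insert e.1 (e.2.1, j)
      | none => acc) PySem.Dict.empty).items

-- ===== PRECONDITION & SPEC =====
-- Pre_ excludes (a) assoc lists with duplicate keys — the Python parameter is a dict, whose keys are
-- always distinct, so such lists represent no Python input — and (b) entries whose line number ln
-- satisfies ln ≤ -len(luascript_lines), on which Python A raises IndexError (lines[ln-1] underflows).
def Pre_verify_and_update_table (table : List (String × String × Int)) (luascript_lines : List String) : Prop :=
  (table.map (fun e => e.1)).Nodup ∧ ∀ e ∈ table, -(luascript_lines.length : Int) < e.2.2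
instance (table : List (String × String × Int)) (luascript_lines : List String) : Decidable (Pre_verify_and_update_table table luascript_lines) := by unfold Pre_verify_and_update_table; infer_instance
def pvWitness_verify_and_update_table : (List (String × String × Int)) × List String :=
  ([("foo", "data.lua", 2), ("bar", "data.lua", 9)], ["x = 1", "foo = 2", "bar = 3"])

-- On tables with an entry whose cached line number ln satisfies -len(lines) < ln ≤ 0 and whose key occurs
-- in the wrapped-around line lines[ln-1], A keeps the nonpositive ln (Python negative-index wraparound),
-- while B searches and returns the 1-based line of the first real match — the intended verified number.
def D_verify_and_update_table (table : List (String × String × Int)) (luascript_lines : List String) : Prop :=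
  ∃ e ∈ table, -(luascript_lines.length : Int) < e.2.2 ∧ e.2.2 ≤ 0 ∧
    PySem.Str.isIn e.1 (PySem.List.pyGetD luascript_lines (e.2.2 - 1) "") = true
instance (table : List (String × String × Int)) (luascript_lines : List String) : Decidable (D_verify_and_update_table table luascript_lines) := by unfold D_verify_and_update_table; infer_instance

def Spec_verify_and_update_table (table : List (String × String × Int)) (luascript_lines : List String) (out : List (String × String × Int)) : Prop := ¬ D_verify_and_update_table table luascript_lines → out = verify_and_update_table_alt table luascript_lines
instance (table : List (String × String × Int)) (luascript_lines : List String) (out : List (String × String × Int)) : Decidable (Spec_verify_and_update_table table luascript_lines out) := by unfold Spec_verify_and_update_table; infer_instance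

def pvDiffWitness_verify_and_update_table : (List (String × String × Int)) × List String :=
  ([("a", "f.lua", 0)], ["a = 1"])
def pvDiffWitnessOut_verify_and_update_table : (List (String × String × Int)) × (List (String × String × Int)) :=
  ([("a", "f.lua", 0)], [("a", "f.lua", 1)])

-- ===== CLAIM (what is proved, stated in full; the proofs are below) =====
def Claim_unchanged_verify_and_update_table : Prop := ∀ (table : List (String × String × Int)) (luascript_lines : List String), Dom_verify_and_update_table table luascript_lines → Pre_verify_and_update_table table luascript_lines → Spec_verify_and_update_table table luascript_lines (verify_and_update_table table luascript_lines)
def Claim_changed_verify_and_update_table : Prop := Dom_verify_and_update_table (pvDiffWitness_verify_and_update_table.1) (pvDiffWitness_verify_and_update_table.2) ∧ Pre_verify_and_update_table (pvDiffWitness_verify_and_update_table.1) (pvDiffWitness_verify_and_update_table.2) ∧ D_verify_and_update_table (pvDiffWitness_verify_and_update_table.1) (pvDiffWitness_verify_and_update_table.2) ∧ verify_and_update_table (pvDiffWitness_verify_and_update_table.1) (pvDiffWitness_verify_and_update_table.2) = pvDiffWitnessOut_verify_and_update_table.1 ∧ verify_and_update_table_alt (pvDiffWitness_verify_and_update_table.1)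 (pvDiffWitness_verify_and_update_table.2) = pvDiffWitnessOut_verify_and_update_table.2 ∧ pvDiffWitnessOut_verify_and_update_table.1 ≠ pvDiffWitnessOut_verify_and_update_table.2
-- ===== LEMMAS AND PROOFS =====

-- first line index (0-based) containing key, the common value both searches compute
def pvFirstIdx (k : String) (lines : List String) : Option Nat :=
  lines.findIdx? (fun l => PySem.Str.isIn k l)

-- per-entry value A inserts (none = key dropped)
def pvValA (lines : List String) (e : String × String × Int) : Option (String × Int) :=
  if e.2.2 ≤ PySem.List.len lines then
    match PySem.List.pyGet? lines (e.2.2 - 1) with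
    | none => none
    | some l =>
      if PySem.Str.isIn e.1 l then some (e.2.1, e.2.2)
      else (pvSearchA e.1 lines 0).map (fun j => (e.2.1, j))
  else (pvSearchA e.1 lines 0).map (fun j => (e.2.1, j))

-- per-entry value B inserts
def pvValB (fastD : PySem.Dict String Int) (found : PySem.Dict String Int) (e : String × String × Int) :
    Option (String × Int) :=
  if fastD.contains e.1 then some (e.2.1, e.2.2)
  else (found.get? e.1).map (fun j => (e.2.1, j))

theorem pvSearchA_eq (k : String) (lines : List String) (i : Nat) :
    pvSearchA k lines i = (pvFirstIdx k lines).map (fun j => ((i + j : Nat) : Int) + 1) := by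
  induction lines generalizing i with
  | nil => rfl
  | cons l ls ih =>
    simp only [pvSearchA, pvFirstIdx, List.findIdx?_cons]
    by_cases h : PySem.Str.isIn k l = true
    · simp only [PySem.Str.isIn] at h
      simp [h]
    · simp only [ih, pvFirstIdx]
      cases hf : List.findIdx? (fun l => PySem.Str.isIn k l) ls with
      | none => simp
      | some j =>
        simp only [h, Bool.false_eq_true, ite_false, Option.map_some]
        congr 1
        push_cast
        ring

theorem pvA_eq (table : List (String × String × Int)) (lines : List String) :
    verify_and_update_table table lines =
      (table.foldl (fun (acc : PySem.Dict String (String × Int)) e =>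
        match pvValA lines e with
        | some v => acc.insert e.1 v
        | none => acc) PySem.Dict.empty).items := by
  unfold verify_and_update_table
  congr 1
  apply List.foldl_ext
  intro acc e _
  unfold pvValA
  by_cases h1 : e.2.2 ≤ PySem.List.len lines
  · rw [if_pos h1, if_pos h1]
    cases hg : PySem.List.pyGet? lines (e.2.2 - 1) with
    | none => rfl
    | some l =>
      dsimp only
      by_cases h2 : PySem.Str.isIn e.1 l = true
      · rw [if_pos h2, if_pos h2]
      · rw [if_neg h2, if_neg h2]
        cases pvSearchA e.1 lines 0 <;> rfl
  · rw [if_neg h1, if_neg h1]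
    cases pvSearchA e.1 lines 0 <;> rfl

theorem pvB_eq (table : List (String × String × Int)) (lines : List String) :
    verify_and_update_table_alt table lines =
      (table.foldl (fun (acc : PySem.Dict String (String × Int)) e =>
        match pvValB (pvFastPass lines (PySem.List.len lines) table).1
            (pvLinePass lines 0 (pvFastPass lines (PySem.List.len lines) table).2 PySem.Dict.empty) e with
        | some v => acc.insert e.1 v
        | none => acc) PySem.Dict.empty).items := by
  have hdef : verify_and_update_table_alt table lines =
      (table.foldl (fun (acc : PySem.Dict String (String × Int)) e =>
        if (pvFastPass lines (PySem.List.len lines) table).1.contains e.1 then acc.insert e.1 (e.2.1, e.2.2)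
        else
          match (pvLinePass lines 0 (pvFastPass lines (PySem.List.len lines) table).2 PySem.Dict.empty).get? e.1 with
          | some j => acc.insert e.1 (e.2.1, j)
          | none => acc) PySem.Dict.empty).items := rfl
  rw [hdef]
  congr 1
  apply List.foldl_ext
  intro acc e _
  unfold pvValB
  by_cases h1 : (pvFastPass lines (PySem.List.len lines) table).1.contains e.1 = true
  · rw [if_pos h1, if_pos h1]
  · rw [if_neg h1, if_neg h1]
    cases (pvLinePass lines 0 (pvFastPass lines (PySem.List.len lines) table).2 PySem.Dict.empty).get? e.1 <;> rfl

theorem pvKeyUnique {table : List (String × String × Int)} (hnd : (table.map (fun e => e.1)).Nodup)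
    {e e' : String × String × Int} (he : e ∈ table) (he' : e' ∈ table) (hk : e'.1 = e.1) : e' = e := by
  induction table with
  | nil => cases he
  | cons a tl ih =>
    simp only [List.map_cons, List.nodup_cons] at hnd
    rcases List.mem_cons.mp he with rfl | he2 <;> rcases List.mem_cons.mp he' with rfl | he2'
    · rfl
    · exact absurd (hk ▸ List.mem_map_of_mem he2') hnd.1
    · exact absurd (hk.symm ▸ List.mem_map_of_mem he2) hnd.1
    · exact ih hnd.2 he2 he2'

theorem pvFastPass_fst (lines : List String) (n : Int) (table : List (String × String × Int))
    (d0 : PySem.Dict String Int) (p0 : List String) (k : String) :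
    (table.foldl (fun st e =>
      if pvFastHit lines n e then (st.1.insert e.1 e.2.2, st.2) else (st.1, st.2 ++ [e.1])) (d0, p0)).1.contains k = true ↔
      d0.contains k = true ∨ ∃ e ∈ table, e.1 = k ∧ pvFastHit lines n e = true := by
  induction table generalizing d0 p0 with
  | nil => simp
  | cons a tl ih =>
    simp only [List.foldl_cons]
    by_cases ha : pvFastHit lines n a = true
    · rw [if_pos ha, ih]
      simp only [PySem.Dict.contains_insert, Bool.or_eq_true, beq_iff_eq, List.mem_cons]
      constructor
      · rintro ((rfl | h1) | ⟨e, he, hek, hee⟩)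
        · exact Or.inr ⟨a, Or.inl rfl, rfl, ha⟩
        · exact Or.inl h1
        · exact Or.inr ⟨e, Or.inr he, hek, hee⟩
      · rintro (h1 | ⟨e, (rfl | he), hek, hee⟩)
        · exact Or.inl (Or.inr h1)
        · exact Or.inl (Or.inl hek.symm)
        · exact Or.inr ⟨e, he, hek, hee⟩
    · rw [if_neg ha, ih]
      simp only [List.mem_cons]
      constructor
      · rintro (h1 | ⟨e, he, hek, hee⟩)
        · exact Or.inl h1
        · exact Or.inr ⟨e, Or.inr he, hek, hee⟩
      · rintro (h1 | ⟨e, (rfl | he), hek, hee⟩)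
        · exact Or.inl h1
        · exact absurd hee ha
        · exact Or.inr ⟨e, he, hek, hee⟩

theorem pvFastPass_snd (lines : List String) (n : Int) (table : List (String × String × Int))
    (d0 : PySem.Dict String Int) (p0 : List String) :
    (table.foldl (fun st e =>
      if pvFastHit lines n e then (st.1.insert e.1 e.2.2, st.2) else (st.1, st.2 ++ [e.1])) (d0, p0)).2 =
      p0 ++ (table.filter (fun e => !pvFastHit lines n e)).map (fun e => e.1) := by
  induction table generalizing d0 p0 with
  | nil => simp
  | cons a tl ih =>
    simp only [List.foldl_cons, List.filter_cons]
    by_cases ha : pvFastHit lines n a = true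
    · rw [if_pos ha, ih]
      simp [ha]
    · rw [if_neg ha, ih]
      simp [ha]

theorem pvLineStep_fst (l : String) (i : Nat) (pending : List String) (p0 : List String)
    (f0 : PySem.Dict String Int) :
    (pending.foldl (fun (p : List String × PySem.Dict String Int) k =>
      if PySem.Str.isIn k l then (p.1, p.2.insert k ((i : Int) + 1)) else (p.1 ++ [k], p.2)) (p0, f0)).1 =
      p0 ++ pending.filter (fun k => !PySem.Str.isIn k l) := by
  induction pending generalizing p0 f0 with
  | nil => simp
  | cons k0 tl ih =>
    simp only [List.foldl_cons, List.filter_cons]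
    by_cases hk0 : PySem.Str.isIn k0 l = true
    · rw [if_pos hk0, ih]
      have hk0' : PySem.Chars.isIn k0.toList l.toList = true := by
        simpa [PySem.Str.isIn] using hk0
      simp [hk0']
    · rw [if_neg hk0, ih]
      have hk0' : PySem.Chars.isIn k0.toList l.toList = false := by
        simpa [PySem.Str.isIn] using hk0
      simp [hk0']

theorem pvLineStep_snd (l : String) (i : Nat) (pending : List String) (p0 : List String)
    (f0 : PySem.Dict String Int) (k : String) :
    (pending.foldl (fun (p : List String × PySem.Dict String Int) k =>
      if PySem.Str.isIn k l then (p.1, p.2.insert k ((i : Int) + 1)) else (p.1 ++ [k], p.2)) (p0, f0)).2.get? k =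
      if k ∈ pending ∧ PySem.Str.isIn k l = true then some ((i : Int) + 1) else f0.get? k := by
  induction pending generalizing p0 f0 with
  | nil => simp
  | cons k0 tl ih =>
    simp only [List.foldl_cons]
    by_cases hk0 : PySem.Str.isIn k0 l = true
    · rw [if_pos hk0, ih]
      by_cases hmem : k ∈ tl ∧ PySem.Str.isIn k l = true
      · rw [if_pos hmem, if_pos ⟨List.mem_cons_of_mem _ hmem.1, hmem.2⟩]
      · rw [if_neg hmem, PySem.Dict.get?_insert]
        by_cases hk : k = k0
        · subst hk
          rw [if_pos rfl, if_pos ⟨List.mem_cons_self, hk0⟩]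
        · rw [if_neg hk, if_neg (by
            rintro ⟨hm, hin⟩
            rcases List.mem_cons.mp hm with rfl | hm
            · exact hk rfl
            · exact hmem ⟨hm, hin⟩)]
    · rw [if_neg hk0, ih]
      by_cases hmem : k ∈ tl ∧ PySem.Str.isIn k l = true
      · rw [if_pos hmem, if_pos ⟨List.mem_cons_of_mem _ hmem.1, hmem.2⟩]
      · rw [if_neg hmem, if_neg (by
          rintro ⟨hm, hin⟩
          rcases List.mem_cons.mp hm with rfl | hm
          · exact absurd hin hk0
          · exact hmem ⟨hm, hin⟩)]

theorem pvLinePass_get (lines : List String) (i : Nat) (pending : List String)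
    (found : PySem.Dict String Int) (k : String) :
    (pvLinePass lines i pending found).get? k =
      if k ∈ pending then
        match pvFirstIdx k lines with
        | some j => some (((i + j : Nat) : Int) + 1)
        | none => found.get? k
      else found.get? k := by
  induction lines generalizing i pending found with
  | nil =>
    by_cases hm : k ∈ pending
    · rw [if_pos hm]; rfl
    · rw [if_neg hm]; rfl
  | cons l ls ih =>
    rw [pvLinePass]
    by_cases hemp : pending.isEmpty = true
    · rw [if_pos hemp]
      have : pending = [] := List.isEmpty_iff.mp hemp
      subst this
      simp
    · rw [if_neg hemp]
      simp only [pvLineStep_fst, List.nil_append, ih, pvLineStep_snd]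
      by_cases hm : k ∈ pending
      · rw [if_pos hm]
        by_cases hin : PySem.Str.isIn k l = true
        · have hin' : PySem.Chars.isIn k.toList l.toList = true := by
            simpa [PySem.Str.isIn] using hin
          have h1 : ¬ k ∈ pending.filter (fun k => !PySem.Str.isIn k l) := by
            simp [List.mem_filter, hin']
          rw [if_neg h1, if_pos ⟨hm, hin⟩]
          simp only [pvFirstIdx, List.findIdx?_cons]
          rw [if_pos hin]
          simp
        · have hin' : PySem.Chars.isIn k.toList l.toList = false := by
            simpa [PySem.Str.isIn] using hin
          have h1 : k ∈ pending.filter (fun k => !PySem.Str.isIn k l) := by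
            simp [List.mem_filter, hm, hin']
          rw [if_pos h1, if_neg (by rintro ⟨_, hi⟩; exact hin hi)]
          simp only [pvFirstIdx, List.findIdx?_cons]
          rw [if_neg hin]
          cases hf : List.findIdx? (fun l => PySem.Str.isIn k l) ls with
          | none => rfl
          | some j =>
            simp only [Option.map_some]
            congr 2
            push_cast
            ring
      · have h1 : ¬ k ∈ pending.filter (fun k => !PySem.Str.isIn k l) := by
          simp only [List.mem_filter]
          rintro ⟨hk, _⟩
          exact hm hk
        rw [if_neg hm, if_neg h1, if_neg (by rintro ⟨hk, _⟩; exact hm hk)]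

theorem pvMain (table : List (String × String × Int)) (lines : List String)
    (hnd : (table.map (fun e => e.1)).Nodup)
    (hnD : ¬ D_verify_and_update_table table lines)
    (e : String × String × Int) (he : e ∈ table)
    (hln : -(lines.length : Int) < e.2.2) :
    pvValA lines e =
      pvValB (pvFastPass lines (PySem.List.len lines) table).1
        (pvLinePass lines 0 (pvFastPass lines (PySem.List.len lines) table).2 PySem.Dict.empty) e := by
  obtain ⟨k, fp, ln⟩ := e
  simp only at hln
  have hfastiff : (pvFastPass lines (PySem.List.len lines) table).1.contains k = true ↔
      pvFastHit lines (PySem.List.len lines) (k, fp, ln) = true := by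
    unfold pvFastPass
    rw [pvFastPass_fst]
    simp only [PySem.Dict.contains_empty, Bool.false_eq_true, false_or]
    constructor
    · rintro ⟨e', he', hk', hh'⟩
      have := pvKeyUnique hnd he he' hk'
      rwa [this] at hh'
    · intro hh
      exact ⟨(k, fp, ln), he, rfl, hh⟩
  have hpendiff : k ∈ (pvFastPass lines (PySem.List.len lines) table).2 ↔
      pvFastHit lines (PySem.List.len lines) (k, fp, ln) = false := by
    unfold pvFastPass
    rw [pvFastPass_snd]
    simp only [List.nil_append, List.mem_map, List.mem_filter]
    constructor
    · rintro ⟨e', ⟨he', hne'⟩, hk'⟩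
      have := pvKeyUnique hnd he he' hk'
      rw [this] at hne'
      simpa using hne'
    · intro hh
      exact ⟨(k, fp, ln), ⟨he, by simp only [hh, Bool.not_false]⟩, rfl⟩
  have hfound := pvLinePass_get lines 0 (pvFastPass lines (PySem.List.len lines) table).2 PySem.Dict.empty k
  by_cases hhit : pvFastHit lines (PySem.List.len lines) (k, fp, ln) = true
  · -- fast path: both keep the cached line number
    have hb := hfastiff.mpr hhit
    unfold pvFastHit at hhit
    simp only [Bool.and_eq_true, decide_eq_true_eq] at hhit
    obtain ⟨⟨h1, h2⟩, h3⟩ := hhit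
    rw [PySem.List.len_eq] at h2
    unfold pvValA pvValB
    rw [if_pos hb]
    simp only
    rw [if_pos (by rw [PySem.List.len_eq]; exact h2)]
    cases hg : PySem.List.pyGet? lines (ln - 1) with
    | none =>
      exfalso
      have := (PySem.List.pyGet?_eq_none_iff lines (ln - 1)).mp hg
      apply this
      simp only [PySem.Raise.InRange]
      omega
    | some l =>
      dsimp only
      have hgd : PySem.List.pyGetD lines (ln - 1) "" = l := by
        rw [show PySem.List.pyGetD lines (ln - 1) "" = (PySem.List.pyGet? lines (ln - 1)).getD "" from rfl, hg]
        rfl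
      rw [hgd] at h3
      rw [if_pos h3]
  · -- search path: both record the first matching line (or drop the key)
    have hb : (pvFastPass lines (PySem.List.len lines) table).1.contains k = false :=
      Bool.not_eq_true _ |>.mp (fun hc => hhit (hfastiff.mp hc))
    have hp : k ∈ (pvFastPass lines (PySem.List.len lines) table).2 :=
      hpendiff.mpr (Bool.not_eq_true _ |>.mp hhit)
    unfold pvValB
    simp only
    rw [if_neg (by intro hc; rw [hc] at hb; exact absurd hb (by decide)), hfound, if_pos hp]
    unfold pvValA
    simp only
    have hsearch : (pvSearchA k lines 0).map (fun j => (fp, j)) =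
        (match pvFirstIdx k lines with
          | some j => some ((((0 : Nat) + j : Nat) : Int) + 1)
          | none => PySem.Dict.empty.get? k).map (fun j => (fp, j)) := by
      rw [pvSearchA_eq]
      cases pvFirstIdx k lines with
      | none => simp [PySem.Dict.get?_empty]
      | some j => rfl
    by_cases h1 : ln ≤ PySem.List.len lines
    · rw [if_pos h1]
      rw [PySem.List.len_eq] at h1
      cases hg : PySem.List.pyGet? lines (ln - 1) with
      | none =>
        exfalso
        have := (PySem.List.pyGet?_eq_none_iff lines (ln - 1)).mp hg
        apply this
        simp only [PySem.Raise.InRange]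
        omega
      | some l =>
        dsimp only
        have hgd : PySem.List.pyGetD lines (ln - 1) "" = l := by
          rw [show PySem.List.pyGetD lines (ln - 1) "" = (PySem.List.pyGet? lines (ln - 1)).getD "" from rfl, hg]
          rfl
        have hisIn : PySem.Str.isIn k l = false := by
          rcases Bool.eq_false_or_eq_true (PySem.Str.isIn k l) with h | h
          swap
          · exact h
          · exfalso
            by_cases h2 : 1 ≤ ln
            · exact hhit (by
                unfold pvFastHit
                simp only [Bool.and_eq_true, decide_eq_true_eq]
                exact ⟨⟨h2, by rw [PySem.List.len_eq]; exact h1⟩, by show PySem.Str.isIn k (PySem.List.pyGetD lines (ln - 1) "") = true; rw [hgd]; exact h⟩)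
            · exact hnD ⟨(k, fp, ln), he,
                show -(lines.length : Int) < ln from hln,
                show ln ≤ 0 by omega,
                show PySem.Str.isIn k (PySem.List.pyGetD lines (ln - 1) "") = true from by rw [hgd]; exact h⟩
        rw [if_neg (by intro hc; rw [hc] at hisIn; exact absurd hisIn (by decide))]
        exact hsearch
    · rw [if_neg h1]
      exact hsearch

-- ===== VERDICT (by name: the statement is the Claim_ definition above) =====
theorem verify_and_update_table_spec : Claim_unchanged_verify_and_update_table := by
  intro table lines _hdom hpre hnD
  rw [pvA_eq, pvB_eq]
  have hfold : ∀ acc : PySem.Dict String (String × Int),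
      table.foldl (fun acc e => match pvValA lines e with
        | some v => acc.insert e.1 v
        | none => acc) acc =
      table.foldl (fun acc e => match pvValB (pvFastPass lines (PySem.List.len lines) table).1
          (pvLinePass lines 0 (pvFastPass lines (PySem.List.len lines) table).2 PySem.Dict.empty) e with
        | some v => acc.insert e.1 v
        | none => acc) acc := by
    intro acc
    apply List.foldl_ext
    intro acc' e he
    rw [pvMain table lines hpre.1 hnD e he (hpre.2 e he)]
  rw [hfold]

theorem verify_and_update_table_changed : Claim_changed_verify_and_update_table := by
  unfold Claim_changed_verify_and_update_table; decide
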